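-- pv_equiv track=rewrite | github.com/AmiralSynux/BreastCancerDiagnostic | preprocessing/process.py | compute_pixel_sums
-- ===== SOURCE A (Python) =====
-- def compute_pixel_sums(thresh):
--     sum_1 = 0
--     for i in range(len(thresh)):
--         for j in range(len(thresh[0]) // 2):
--             if thresh[i][j] == 255:
--                 sum_1 += 255
--
--     sum_2 = 0
--     for i in range(len(thresh)):
--         for j in range(len(thresh[0]) // 2, len(thresh[0])):
--             if thresh[i][j] == 255:
--                 sum_2 += 255
--     return sum_1, sum_2
-- ===== SOURCE B (Python) =====
-- def compute_pixel_sums(thresh):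
--     # Column-major: transpose the matrix and route each column's white count
--     # to the left or right accumulator depending on the column index.
--     mid = len(thresh[0]) // 2 if thresh else 0
--     sums = [0, 0]
--     for j, col in enumerate(zip(*thresh)):
--         sums[j >= mid] += 255 * col.count(255)
--     return sums[0], sums[1]
-- ===== Notes on version B (the rewrite author's own statement) =====
-- stated objective: alternative
-- what changed: B traverses the matrix column-major: it transposes via zip(*thresh) and adds each column's white count (times 255) to the left or right accumulator by column index, instead of A's two row-major nested index loops adding 255 per pixel.
import Mathlib
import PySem

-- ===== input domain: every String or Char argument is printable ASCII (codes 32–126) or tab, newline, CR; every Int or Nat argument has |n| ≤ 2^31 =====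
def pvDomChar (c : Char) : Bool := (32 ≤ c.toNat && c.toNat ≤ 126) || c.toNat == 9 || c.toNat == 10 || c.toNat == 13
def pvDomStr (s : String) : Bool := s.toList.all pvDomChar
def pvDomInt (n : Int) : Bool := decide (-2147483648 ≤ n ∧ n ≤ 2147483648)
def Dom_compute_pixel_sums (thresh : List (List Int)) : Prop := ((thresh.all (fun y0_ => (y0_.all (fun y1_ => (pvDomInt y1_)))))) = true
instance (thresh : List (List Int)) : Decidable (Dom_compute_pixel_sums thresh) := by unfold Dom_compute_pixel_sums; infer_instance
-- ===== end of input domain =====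

-- B traverses the matrix column-major (zip(*thresh) transpose, per-column counts routed
-- by column index) instead of A's two row-major nested index loops (alternative, same cost).

-- ===== PORT A =====
def compute_pixel_sums (thresh : List (List Int)) : Int × Int :=
  let sum1 : Int :=
    (PySem.List.pyRange 0 (thresh.length : Int) 1).foldl (fun s i =>
      (PySem.List.pyRange 0
          (PySem.Int.floordiv ((PySem.List.pyGetD thresh 0 []).length : Int) 2) 1).foldl
        (fun s j =>
          if PySem.List.pyGetD (PySem.List.pyGetD thresh i []) j 0 == 255 then s + 255 else s) s) 0
  let sum2 : Int :=
    (PySem.List.pyRange 0 (thresh.length : Int) 1).foldl (fun s i =>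
      (PySem.List.pyRange
          (PySem.Int.floordiv ((PySem.List.pyGetD thresh 0 []).length : Int) 2)
          ((PySem.List.pyGetD thresh 0 []).length : Int) 1).foldl
        (fun s j =>
          if PySem.List.pyGetD (PySem.List.pyGetD thresh i []) j 0 == 255 then s + 255 else s) s) 0
  (sum1, sum2)

-- ===== PORT B =====
-- zip(*rows): columns of the matrix, truncated to the shortest row (hand port, exact:
-- Python's zip stops as soon as any row is exhausted; the fuel is the first row's length,
-- at which the first row itself is exhausted, so it never cuts the recursion short).
def pvZipStarGo : Nat → List (List Int) → List (List Int)
  | 0, _ => []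
  | Nat.succ n, rows =>
    if rows.any (·.isEmpty) then []
    else (rows.map (fun r => r.headD 0)) :: pvZipStarGo n (rows.map List.tail)

def pvZipStar (rows : List (List Int)) : List (List Int) :=
  if rows.isEmpty then [] else pvZipStarGo (rows.headD []).length rows

def compute_pixel_sums_alt (thresh : List (List Int)) : Int × Int :=
  let mid : Int :=
    if thresh ≠ [] then PySem.Int.floordiv ((thresh.headD []).length : Int) 2 else 0
  let sums : Int × Int :=
    (PySem.List.enumerate (pvZipStar thresh) 0).foldl
      (fun s jc =>
        if jc.1 ≥ mid then (s.1, s.2 + 255 * (PySem.List.count jc.2 (255 : Int) : Int))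
        else (s.1 + 255 * (PySem.List.count jc.2 (255 : Int) : Int), s.2))
      (0, 0)
  (sums.1, sums.2)

-- ===== PRECONDITION & SPEC =====
-- Pre_ excludes non-empty ragged matrices with a row shorter than the first row: there A raises IndexError.
def Pre_compute_pixel_sums (thresh : List (List Int)) : Prop :=
  ∀ row ∈ thresh, (thresh.headD []).length ≤ row.length
instance (thresh : List (List Int)) : Decidable (Pre_compute_pixel_sums thresh) := by
  unfold Pre_compute_pixel_sums; infer_instance
def pvWitness_compute_pixel_sums : List (List Int) := [[255, 0], [255, 255]]

def Spec_compute_pixel_sums (thresh : List (List Int)) (out : Int × Int) : Prop :=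
  out = compute_pixel_sums_alt thresh
instance (thresh : List (List Int)) (out : Int × Int) : Decidable (Spec_compute_pixel_sums thresh out) := by
  unfold Spec_compute_pixel_sums; infer_instance

-- ===== CLAIM (what is proved, stated in full; the proofs are below) =====
def Claim_equal_compute_pixel_sums : Prop := ∀ (thresh : List (List Int)), Dom_compute_pixel_sums thresh → Pre_compute_pixel_sums thresh → Spec_compute_pixel_sums thresh (compute_pixel_sums thresh)
-- ===== LEMMAS AND PROOFS =====

-- per-pixel accumulation over a list of pixel values is 255 times the count of 255s
theorem pvFold255 (l : List Int) (s : Int) :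
    l.foldl (fun s x => if x == 255 then s + 255 else s) s = s + 255 * (l.count 255 : Int) := by
  induction l generalizing s with
  | nil => simp
  | cons x xs ih =>
    rw [List.foldl_cons]
    by_cases hx : x = 255
    · subst hx
      rw [if_pos (by simp), ih, List.count_cons_self]
      push_cast; ring
    · rw [if_neg (by simp [hx]), ih, List.count_cons_of_ne (by simp [hx])]

-- indexing a segment [a, b) of a row (b within bounds) yields the drop/take segment
theorem pvMapSeg (row : List Int) (a b : Nat) (hb : b ≤ row.length) :
    (PySem.List.pyRange (a : Int) (b : Int) 1).map (fun j => PySem.List.pyGetD row j 0)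
      = (row.drop a).take (b - a) := by
  apply List.ext_getElem
  · simp [PySem.List.length_pyRange_one]; omega
  · intro k h1 h2
    rw [List.getElem_map, PySem.List.getElem_pyRange_one]
    have hlen : ((PySem.List.pyRange (a : Int) (b : Int) 1).map
        (fun j => PySem.List.pyGetD row j 0)).length = ((b : Int) - (a : Int)).toNat := by
      simp [PySem.List.length_pyRange_one]
    have hk : k < b - a := by
      have := h1; rw [hlen] at this; omega
    have hcast : (a : Int) + (k : Int) = ((a + k : Nat) : Int) := by push_cast; ring
    rw [hcast, PySem.List.pyGetD_natCast]
    have hak : a + k < row.length := by omega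
    rw [List.getD_eq_getElem row 0 hak, List.getElem_take, List.getElem_drop]

theorem pvInner (row : List Int) (a b : Nat) (hb : b ≤ row.length) (s : Int) :
    (PySem.List.pyRange (a : Int) (b : Int) 1).foldl
        (fun s j => if PySem.List.pyGetD row j 0 == 255 then s + 255 else s) s
      = s + 255 * (((row.drop a).take (b - a)).count 255 : Int) := by
  have h := List.foldl_map (f := fun j => PySem.List.pyGetD row j (0 : Int))
    (g := fun s x => if x == (255 : Int) then s + 255 else s)
    (l := PySem.List.pyRange (a : Int) (b : Int) 1) (init := s)
  rw [pvMapSeg row a b hb] at h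
  rw [← h, pvFold255]

-- r.getD 0 = r.headD
theorem pvGetDZero (r : List Int) : r.getD 0 0 = r.headD 0 := by
  cases r <;> simp

-- r.tail.getD j = r.getD (j+1)
theorem pvGetDTail (r : List Int) (j : Nat) : r.tail.getD j 0 = r.getD (j + 1) 0 := by
  cases r <;> simp [List.getD]

-- (r.drop m).getD k = r.getD (m+k)
theorem pvGetDDrop (r : List Int) (m k : Nat) : (r.drop m).getD k 0 = r.getD (m + k) 0 := by
  simp [List.getD, List.getElem?_drop]

-- the fuelled column builder on a non-ragged matrix = the list of the first n columns
theorem pvZipStarGo_eq (n : Nat) : ∀ (rows : List (List Int)),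
    (∀ r ∈ rows, n ≤ r.length) →
    pvZipStarGo n rows = (List.range n).map (fun j => rows.map (fun r => r.getD j 0)) := by
  induction n with
  | zero => intro rows _; simp [pvZipStarGo]
  | succ n ih =>
    intro rows hall
    rw [pvZipStarGo]
    rw [if_neg]
    · have hall' : ∀ r ∈ rows.map List.tail, n ≤ r.length := by
        intro t ht
        obtain ⟨r, hr, rfl⟩ := List.mem_map.mp ht
        have := hall r hr
        simp only [List.length_tail]
        omega
      rw [ih (rows.map List.tail) hall']
      rw [List.range_succ_eq_map]
      simp only [List.map_cons, List.map_map]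
      congr 1
      · exact List.map_congr_left (fun r _ => (pvGetDZero r).symm)
      · apply List.map_congr_left
        intro j _
        simp only [Function.comp_def, Nat.succ_eq_add_one]
        exact List.map_congr_left (fun r _ => pvGetDTail r j)
    · simp only [List.any_eq_true]
      push_neg
      intro r hr
      have hlen := hall r hr
      cases r with
      | nil => simp at hlen
      | cons a as => simp

-- zip(*rows) on a non-empty non-ragged matrix = the list of its first-row-length columns
theorem pvZipStar_eq (n : Nat) (rows : List (List Int)) (hne : rows ≠ [])
    (hall : ∀ r ∈ rows, n ≤ r.length) (hhead : (rows.headD []).length = n) :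
    pvZipStar rows = (List.range n).map (fun j => rows.map (fun r => r.getD j 0)) := by
  unfold pvZipStar
  rw [if_neg (by simp [List.isEmpty_iff, hne]), hhead]
  exact pvZipStarGo_eq n rows hall

-- enumerate of a range-mapped list
theorem pvEnumMapRange : ∀ (n : Nat) (g : Nat → List Int) (s : Int),
    PySem.List.enumerate ((List.range n).map g) s
      = (List.range n).map (fun (j : Nat) => (s + (j : Int), g j)) := by
  intro n
  induction n with
  | zero => intro g s; simp [PySem.List.enumerate_nil]
  | succ n ih =>
    intro g s
    rw [List.range_succ_eq_map]
    simp only [List.map_cons, List.map_map, PySem.List.enumerate_cons]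
    rw [ih (g ∘ Nat.succ) (s + 1)]
    congr 1
    · simp
    · apply List.map_congr_left
      intro j _
      simp only [Function.comp_def, Nat.succ_eq_add_one]
      congr 1
      push_cast; ring

-- a pair fold where every step takes the "left" branch
theorem pvFoldLeftBranch (c : Nat → Int) (m : Int) :
    ∀ (l : List Nat), (∀ j ∈ l, ¬ ((j : Int) ≥ m)) → ∀ (s : Int × Int),
    l.foldl (fun (s : Int × Int) (j : Nat) => if (j : Int) ≥ m then (s.1, s.2 + c j) else (s.1 + c j, s.2)) s
      = (s.1 + (l.map c).sum, s.2) := by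
  intro l
  induction l with
  | nil => intro _ s; simp
  | cons j js ih =>
    intro h s
    rw [List.foldl_cons, if_neg (h j (by simp))]
    rw [ih (fun x hx => h x (by simp [hx]))]
    simp; ring

-- a pair fold where every step takes the "right" branch
theorem pvFoldRightBranch (c : Nat → Int) (m : Int) :
    ∀ (l : List Nat), (∀ j ∈ l, (j : Int) ≥ m) → ∀ (s : Int × Int),
    l.foldl (fun (s : Int × Int) (j : Nat) => if (j : Int) ≥ m then (s.1, s.2 + c j) else (s.1 + c j, s.2)) s
      = (s.1, s.2 + (l.map c).sum) := by
  intro l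
  induction l with
  | nil => intro _ s; simp
  | cons j js ih =>
    intro h s
    rw [List.foldl_cons, if_pos (h j (by simp))]
    rw [ih (fun x hx => h x (by simp [hx]))]
    simp; ring

-- 0/1 indicator sum over range m equals the count in the take-m prefix
theorem pvCountTake (r : List Int) (m : Nat) (hm : m ≤ r.length) :
    ((List.range m).map (fun j => if r.getD j 0 = 255 then (1 : Int) else 0)).sum
      = ((r.take m).count 255 : Int) := by
  induction m with
  | zero => simp
  | succ m ih =>
    have hlt : m < r.length := by omega
    rw [List.range_succ, List.map_append, List.sum_append, ih (by omega),
      List.take_succ, List.getElem?_eq_getElem hlt]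
    simp only [Option.toList_some, List.count_append, List.map_cons, List.map_nil,
      List.sum_cons, List.sum_nil, add_zero, List.getD_eq_getElem r 0 hlt]
    by_cases h : r[m] = 255 <;> simp [h]

-- exchange of summation: column counts summed = per-row prefix counts summed
theorem pvExchange (m : Nat) :
    ∀ (rows : List (List Int)), (∀ r ∈ rows, m ≤ r.length) →
    ((List.range m).map (fun j => ((rows.map (fun r => r.getD j 0)).count 255 : Int))).sum
      = (rows.map (fun r => ((r.take m).count 255 : Int))).sum := by
  intro rows
  induction rows with
  | nil => intro _; simp
  | cons r rs ih =>
    intro hall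
    have hstep : ∀ j : Nat,
        (((r :: rs).map (fun r => r.getD j 0)).count 255 : Int)
          = (if r.getD j 0 = 255 then (1 : Int) else 0)
              + ((rs.map (fun r => r.getD j 0)).count 255 : Int) := by
      intro j
      simp only [List.map_cons, List.count_cons]
      push_cast
      rw [add_comm]
      congr 1
      simp
    calc ((List.range m).map (fun j => (((r :: rs).map (fun r => r.getD j 0)).count 255 : Int))).sum
        = ((List.range m).map (fun j =>
            (if r.getD j 0 = 255 then (1 : Int) else 0)
              + ((rs.map (fun r => r.getD j 0)).count 255 : Int))).sum := by
          exact congrArg List.sum (List.map_congr_left (fun j _ => hstep j))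
      _ = ((List.range m).map (fun j => if r.getD j 0 = 255 then (1 : Int) else 0)).sum
            + ((List.range m).map (fun j => ((rs.map (fun r => r.getD j 0)).count 255 : Int))).sum := by
          exact PySem.List.sum_map_add_int _ _ _
      _ = ((r.take m).count 255 : Int) + (rs.map (fun r => ((r.take m).count 255 : Int))).sum := by
          rw [pvCountTake r m (hall r (by simp)), ih (fun x hx => hall x (by simp [hx]))]
      _ = ((r :: rs).map (fun r => ((r.take m).count 255 : Int))).sum := by simp

-- ===== VERDICT (by name: the statement is the Claim_ definition above) =====
theorem compute_pixel_sums_spec : Claim_equal_compute_pixel_sums := by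
  intro thresh _ hpre
  unfold Pre_compute_pixel_sums at hpre
  unfold Spec_compute_pixel_sums compute_pixel_sums compute_pixel_sums_alt
  cases thresh with
  | nil =>
    simp [pvZipStar, PySem.List.pyRange_one_eq_nil, PySem.List.enumerate_nil]
  | cons r0 rest =>
    simp only [List.headD_cons] at hpre
    simp only [PySem.List.pyGetD_zero_cons, List.headD_cons, PySem.List.count_eq]
    have hmid : PySem.Int.floordiv (r0.length : Int) 2 = ((r0.length / 2 : Nat) : Int) :=
      PySem.Int.floordiv_natCast r0.length 2
    rw [hmid]
    have hne : (r0 :: rest : List (List Int)) ≠ [] := by simp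
    rw [if_pos hne]
    -- A side: each outer fold is a fold over the rows, each inner fold is 255 * a segment count
    rw [PySem.List.foldl_pyRange_zero_pyGetD' (r0 :: rest) []
      (fun s row => (PySem.List.pyRange (((r0.length / 2 : Nat) : Int)) ((r0.length : Nat) : Int) 1).foldl
        (fun s j => if PySem.List.pyGetD row j 0 == 255 then s + 255 else s) s) 0]
    rw [PySem.List.foldl_pyRange_zero_pyGetD' (r0 :: rest) []
      (fun s row => (PySem.List.pyRange (0 : Int) (((r0.length / 2 : Nat)) : Int) 1).foldl
        (fun s j => if PySem.List.pyGetD row j 0 == 255 then s + 255 else s) s) 0]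
    rw [PySem.List.foldl_congr_mem (l := r0 :: rest) (init := (0 : Int))
      (f := fun s row => (PySem.List.pyRange (0 : Int) (((r0.length / 2 : Nat)) : Int) 1).foldl
          (fun s j => if PySem.List.pyGetD row j 0 == 255 then s + 255 else s) s)
      (g := fun s row => s + 255 * (((row.take (r0.length / 2)).count 255 : Nat) : Int))
      (by intro acc row hrow
          have hb : r0.length / 2 ≤ row.length :=
            le_trans (Nat.div_le_self _ _) (hpre row hrow)
          beta_reduce
          have h := pvInner row 0 (r0.length / 2) hb acc
          simp only [Nat.cast_zero, List.drop_zero, Nat.sub_zero] at h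
          exact h)]
    rw [PySem.List.foldl_congr_mem (l := r0 :: rest) (init := (0 : Int))
      (f := fun s row => (PySem.List.pyRange (((r0.length / 2 : Nat)) : Int) ((r0.length : Nat) : Int) 1).foldl
          (fun s j => if PySem.List.pyGetD row j 0 == 255 then s + 255 else s) s)
      (g := fun s row => s + 255 * ((((row.drop (r0.length / 2)).take (r0.length - r0.length / 2)).count 255 : Nat) : Int))
      (by intro acc row hrow
          beta_reduce
          exact pvInner row (r0.length / 2) r0.length (hpre row hrow) acc)]
    rw [PySem.List.foldl_add, PySem.List.foldl_add, zero_add, zero_add]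
    -- B side: columns, enumerate, split the fold at the midpoint
    rw [pvZipStar_eq r0.length (r0 :: rest) hne hpre (by simp)]
    rw [pvEnumMapRange r0.length (fun j => (r0 :: rest).map (fun r => r.getD j 0)) 0]
    simp only [zero_add, List.foldl_map]
    have hsplit : List.range r0.length
        = List.range (r0.length / 2)
            ++ (List.range (r0.length - r0.length / 2)).map (fun k => r0.length / 2 + k) := by
      rw [← List.range_add]
      congr 1
      omega
    rw [hsplit, List.foldl_append]
    rw [pvFoldLeftBranch
      (fun j => 255 * ((List.count 255 ((r0 :: rest).map (fun r => r.getD j 0)) : Nat) : Int))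
      ((r0.length / 2 : Nat) : Int) (List.range (r0.length / 2))
      (by intro j hj
          simp only [List.mem_range] at hj
          push_cast
          omega) (0, 0)]
    rw [pvFoldRightBranch
      (fun j => 255 * ((List.count 255 ((r0 :: rest).map (fun r => r.getD j 0)) : Nat) : Int))
      ((r0.length / 2 : Nat) : Int)
      ((List.range (r0.length - r0.length / 2)).map (fun k => r0.length / 2 + k))
      (by intro j hj
          obtain ⟨k, hk, rfl⟩ := List.mem_map.mp hj
          push_cast
          omega)]
    -- both components are 255 * the same double count, summed the two ways
    have hL : ((List.range (r0.length / 2)).map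
          (fun j => 255 * ((List.count 255 ((r0 :: rest).map (fun r => r.getD j 0)) : Nat) : Int))).sum
        = ((r0 :: rest).map (fun row => 255 * (((row.take (r0.length / 2)).count 255 : Nat) : Int))).sum := by
      rw [List.sum_map_mul_left, List.sum_map_mul_left]
      congr 1
      exact pvExchange (r0.length / 2) (r0 :: rest)
        (fun r hr => le_trans (Nat.div_le_self _ _) (hpre r hr))
    have hR : (((List.range (r0.length - r0.length / 2)).map (fun k => r0.length / 2 + k)).map
          (fun j => 255 * ((List.count 255 ((r0 :: rest).map (fun r => r.getD j 0)) : Nat) : Int))).sum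
        = ((r0 :: rest).map (fun row =>
            255 * ((((row.drop (r0.length / 2)).take (r0.length - r0.length / 2)).count 255 : Nat) : Int))).sum := by
      rw [List.map_map]
      have hcol : ∀ k : Nat,
          (r0 :: rest).map (fun r => r.getD (r0.length / 2 + k) 0)
            = ((r0 :: rest).map (List.drop (r0.length / 2))).map (fun r => r.getD k 0) := by
        intro k
        rw [List.map_map]
        exact List.map_congr_left (fun r _ => (pvGetDDrop r (r0.length / 2) k).symm)
      calc (((List.range (r0.length - r0.length / 2))).map
            ((fun j => 255 * ((List.count 255 ((r0 :: rest).map (fun r => r.getD j 0)) : Nat) : Int))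
              ∘ (fun k => r0.length / 2 + k))).sum
          = ((List.range (r0.length - r0.length / 2)).map
              (fun k => 255 * ((List.count 255
                (((r0 :: rest).map (List.drop (r0.length / 2))).map (fun r => r.getD k 0)) : Nat) : Int))).sum := by
            exact congrArg List.sum (List.map_congr_left (fun k _ => by
              simp only [Function.comp_def]
              rw [hcol k]))
        _ = (((r0 :: rest).map (List.drop (r0.length / 2))).map
              (fun r => 255 * (((r.take (r0.length - r0.length / 2)).count 255 : Nat) : Int))).sum := by
            rw [List.sum_map_mul_left, List.sum_map_mul_left]
            congr 1
            exact pvExchange (r0.length - r0.length / 2) ((r0 :: rest).map (List.drop (r0.length / 2)))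
              (by intro t ht
                  obtain ⟨r, hr, rfl⟩ := List.mem_map.mp ht
                  have := hpre r hr
                  simp only [List.length_drop]
                  omega)
        _ = ((r0 :: rest).map (fun row =>
              255 * ((((row.drop (r0.length / 2)).take (r0.length - r0.length / 2)).count 255 : Nat) : Int))).sum := by
            simp only [List.map_map, Function.comp_def]
    simp only [hL, hR]
    simp only [zero_add]
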